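-- pv_equiv track=rewrite | github.com/HiAliens/DataStructAndAlgorithm | 查找/二分查找的四种变体.py | bsearch_variation4
-- ===== SOURCE A (Python) =====
-- from typing import List
--
-- def bsearch_variation4(a: List[int], value: int):
--     """
--     查找最后一个小于等于给定值的元素
--     :param a:array to search
--     :param value:desired item
--     :return:
--     """
--     low = 0
--     high = len(a) - 1
--     while low <= high:
--         mid = low + ((high - low) >> 1)
--         if a[mid] > value:
--             high = mid - 1
--         else:
--             if mid == len(a)-1 or a[mid+1] > value: return mid
--             else:
--                 low = mid + 1
--     return -1
-- ===== SOURCE B (Python) =====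
-- def bsearch_variation4(a, value):
--     low, high, ans = 0, len(a) - 1, -1
--     while low <= high:
--         mid = low + ((high - low) >> 1)
--         if a[mid] <= value:
--             ans = mid
--             low = mid + 1
--         else:
--             high = mid - 1
--     return ans
-- ===== Notes on version B (the rewrite author's own statement) =====
-- stated objective: idiomatic
-- what changed: Replaced A's early-return binary search that peeks at the right neighbour a[mid+1] with the standard candidate-accumulator binary search (ans=-1; a[mid]<=value records ans=mid and moves low, else moves high; return ans after the loop); Pre_ excludes arrays of length >= 6 that value does not partition (an element > value before one <= value), where A's returned index is an accident of its probe order -- the two agree on all shorter arrays and on all partitioned (in particular sorted) arrays.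
-- outside the precondition, e.g. on bsearch_variation4([1, 2, -2, 3, -1, 3], 2): A returns 2, B returns 4
import Mathlib
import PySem

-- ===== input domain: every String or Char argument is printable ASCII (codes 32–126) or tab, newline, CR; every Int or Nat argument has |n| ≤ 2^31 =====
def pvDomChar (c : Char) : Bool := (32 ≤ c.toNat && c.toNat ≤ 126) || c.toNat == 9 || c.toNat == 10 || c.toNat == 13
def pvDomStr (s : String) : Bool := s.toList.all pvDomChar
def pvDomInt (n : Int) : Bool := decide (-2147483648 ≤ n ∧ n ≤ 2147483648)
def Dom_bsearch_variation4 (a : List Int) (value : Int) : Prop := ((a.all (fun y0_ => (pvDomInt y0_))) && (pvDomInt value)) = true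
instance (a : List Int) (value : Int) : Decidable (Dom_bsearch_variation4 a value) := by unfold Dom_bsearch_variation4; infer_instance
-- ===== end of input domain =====

-- B replaces A's neighbour-peeking early-return binary search by the standard
-- candidate-accumulator binary search for "last index with a[i] <= value".


-- ===== PORT A =====
-- while-loop of A as well-founded recursion on the span high-low.
-- Python's (high-low)>>1 equals (high-low)/2 here since low ≤ high in the loop;
-- a[mid] / a[mid+1] are ported with pyGetD: the indices are always in range when reached.
def bv4Loop (a : List Int) (value low high : Int) : Int :=
  if _h : low ≤ high then
    if PySem.List.pyGetD a (low + (high - low) / 2) 0 > value then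
      bv4Loop a value low ((low + (high - low) / 2) - 1)
    else
      if (low + (high - low) / 2) = (a.length : Int) - 1 ∨
          PySem.List.pyGetD a ((low + (high - low) / 2) + 1) 0 > value then
        low + (high - low) / 2
      else
        bv4Loop a value ((low + (high - low) / 2) + 1) high
  else -1
termination_by (high + 1 - low).toNat
decreasing_by all_goals omega

def bsearch_variation4 (a : List Int) (value : Int) : Int :=
  bv4Loop a value 0 ((a.length : Int) - 1)

-- ===== PORT B =====
-- candidate-accumulator loop of Source B
def bv4AltLoop (a : List Int) (value low high ans : Int) : Int :=
  if _h : low ≤ high then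
    if PySem.List.pyGetD a (low + (high - low) / 2) 0 ≤ value then
      bv4AltLoop a value ((low + (high - low) / 2) + 1) high (low + (high - low) / 2)
    else
      bv4AltLoop a value low ((low + (high - low) / 2) - 1) ans
  else ans
termination_by (high + 1 - low).toNat
decreasing_by all_goals omega

def bsearch_variation4_alt (a : List Int) (value : Int) : Int :=
  bv4AltLoop a value 0 ((a.length : Int) - 1) (-1)

-- ===== PRECONDITION & SPEC =====
-- Pre_ excludes arrays of length ≥ 6 that value does not partition (i.e. some element > value
-- appears before an element ≤ value), where A's returned index is an accidental artefact of its
-- probe order; the two programs agree on every shorter array and on every value-partitioned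
-- array — in particular on every sorted array, binary search's contract.
def Pre_bsearch_variation4 (a : List Int) (value : Int) : Prop :=
  a.length ≤ 5 ∨ List.Pairwise (fun x y => y ≤ value → x ≤ value) a
instance (a : List Int) (value : Int) : Decidable (Pre_bsearch_variation4 a value) := by
  unfold Pre_bsearch_variation4; infer_instance
def pvWitness_bsearch_variation4 : List Int × Int := ([1, 2, 2, 5], 2)

def Spec_bsearch_variation4 (a : List Int) (value : Int) (out : Int) : Prop := out = bsearch_variation4_alt a value
instance (a : List Int) (value : Int) (out : Int) : Decidable (Spec_bsearch_variation4 a value out) := by unfold Spec_bsearch_variation4; infer_instance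

-- ===== CLAIM (what is proved, stated in full; the proofs are below) =====
def Claim_equal_bsearch_variation4 : Prop := ∀ (a : List Int) (value : Int), Dom_bsearch_variation4 a value → Pre_bsearch_variation4 a value → Spec_bsearch_variation4 a value (bsearch_variation4 a value)

-- ===== LEMMAS AND PROOFS =====

-- Both loops only ever compare elements against value, so they factor through the
-- boolean pattern (fun x => decide (x ≤ value)); fuel-indexed pattern twins let the
-- length ≤ 5 case be finished by `decide`.
def patLoopA (bs : List Bool) : Nat → Int → Int → Int
  | 0, _, _ => -1
  | n + 1, low, high =>
    if low ≤ high then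
      if ¬ bs.getD (low + (high - low) / 2).toNat false then
        patLoopA bs n low ((low + (high - low) / 2) - 1)
      else
        if (low + (high - low) / 2) = (bs.length : Int) - 1 ∨
            ¬ bs.getD ((low + (high - low) / 2) + 1).toNat false then
          low + (high - low) / 2
        else
          patLoopA bs n ((low + (high - low) / 2) + 1) high
    else -1

def patLoopB (bs : List Bool) : Nat → Int → Int → Int → Int
  | 0, _, _, ans => ans
  | n + 1, low, high, ans =>
    if low ≤ high then
      if bs.getD (low + (high - low) / 2).toNat false then
        patLoopB bs n ((low + (high - low) / 2) + 1) high (low + (high - low) / 2)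
      else
        patLoopB bs n low ((low + (high - low) / 2) - 1) ans
    else ans

theorem factorA (a : List Int) (value : Int) :
    ∀ (n : Nat) (low high : Int), (high + 1 - low).toNat ≤ n →
      0 ≤ low → high ≤ (a.length : Int) - 1 →
      bv4Loop a value low high = patLoopA (a.map (fun x => decide (x ≤ value))) n low high := by
  intro n
  induction n with
  | zero =>
    intro low high hn h0 hh
    have hlh : ¬ low ≤ high := by omega
    rw [bv4Loop, dif_neg hlh]
    rfl
  | succ m ih =>
    intro low high hn h0 hh
    by_cases hlh : low ≤ high
    · have hm0 : 0 ≤ low + (high - low) / 2 := by omega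
      have hml : low + (high - low) / 2 < (a.length : Int) := by omega
      have hmlt : (low + (high - low) / 2).toNat < a.length := by omega
      have hget : PySem.List.pyGetD a (low + (high - low) / 2) 0
          = a[(low + (high - low) / 2).toNat] :=
        PySem.List.pyGetD_eq_getElem a 0 hm0 (by exact_mod_cast hml)
      have hbs : (a.map (fun x => decide (x ≤ value))).getD (low + (high - low) / 2).toNat false
          = decide (a[(low + (high - low) / 2).toNat] ≤ value) := by
        rw [List.getD_eq_getElem _ _ (by simpa using hmlt), List.getElem_map]
      rw [bv4Loop, dif_pos hlh, patLoopA, if_pos hlh, hget]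
      simp only [hbs, List.length_map, decide_eq_true_eq]
      by_cases hv : a[(low + (high - low) / 2).toNat] ≤ value
      · rw [if_neg (c := a[(low + (high - low) / 2).toNat] > value) (by omega),
          if_neg (c := ¬ a[(low + (high - low) / 2).toNat] ≤ value) (by simp [hv])]
        by_cases hlast : low + (high - low) / 2 = (a.length : Int) - 1
        · rw [if_pos (c := low + (high - low) / 2 = (a.length : Int) - 1 ∨
              PySem.List.pyGetD a (low + (high - low) / 2 + 1) 0 > value) (Or.inl hlast),
            if_pos (c := low + (high - low) / 2 = (a.length : Int) - 1 ∨
              ¬ (a.map (fun x => decide (x ≤ value))).getD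
                  (low + (high - low) / 2 + 1).toNat false = true) (Or.inl hlast)]
        · have hnl : (low + (high - low) / 2) + 1 < (a.length : Int) := by omega
          have hnlt : ((low + (high - low) / 2) + 1).toNat < a.length := by omega
          have hgn : PySem.List.pyGetD a ((low + (high - low) / 2) + 1) 0
              = a[((low + (high - low) / 2) + 1).toNat] :=
            PySem.List.pyGetD_eq_getElem a 0 (by omega) (by exact_mod_cast hnl)
          have hbn : (a.map (fun x => decide (x ≤ value))).getD
                ((low + (high - low) / 2) + 1).toNat false
              = decide (a[((low + (high - low) / 2) + 1).toNat] ≤ value) := by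
            rw [List.getD_eq_getElem _ _ (by simpa using hnlt), List.getElem_map]
          rw [hgn]
          simp only [hbn, decide_eq_true_eq]
          by_cases hv2 : a[((low + (high - low) / 2) + 1).toNat] ≤ value
          · rw [if_neg (c := low + (high - low) / 2 = (a.length : Int) - 1 ∨
                  a[(low + (high - low) / 2 + 1).toNat] > value)
                (by rintro (h | h); exacts [hlast h, by omega]),
              if_neg (c := low + (high - low) / 2 = (a.length : Int) - 1 ∨
                  ¬ a[(low + (high - low) / 2 + 1).toNat] ≤ value)
                (by rintro (h | h); exacts [hlast h, h hv2])]
            exact ih _ _ (by omega) (by omega) hh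
          · rw [if_pos (c := low + (high - low) / 2 = (a.length : Int) - 1 ∨
                  a[(low + (high - low) / 2 + 1).toNat] > value) (Or.inr (by omega)),
              if_pos (c := low + (high - low) / 2 = (a.length : Int) - 1 ∨
                  ¬ a[(low + (high - low) / 2 + 1).toNat] ≤ value) (Or.inr hv2)]
      · rw [if_pos (c := a[(low + (high - low) / 2).toNat] > value) (by omega),
          if_pos (c := ¬ a[(low + (high - low) / 2).toNat] ≤ value) hv]
        exact ih _ _ (by omega) h0 (by omega)
    · rw [bv4Loop, dif_neg hlh, patLoopA, if_neg hlh]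

theorem factorB (a : List Int) (value : Int) :
    ∀ (n : Nat) (low high ans : Int), (high + 1 - low).toNat ≤ n →
      0 ≤ low → high ≤ (a.length : Int) - 1 →
      bv4AltLoop a value low high ans
        = patLoopB (a.map (fun x => decide (x ≤ value))) n low high ans := by
  intro n
  induction n with
  | zero =>
    intro low high ans hn h0 hh
    have hlh : ¬ low ≤ high := by omega
    rw [bv4AltLoop, dif_neg hlh]
    rfl
  | succ m ih =>
    intro low high ans hn h0 hh
    by_cases hlh : low ≤ high
    · have hm0 : 0 ≤ low + (high - low) / 2 := by omega
      have hml : low + (high - low) / 2 < (a.length : Int) := by omega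
      have hmlt : (low + (high - low) / 2).toNat < a.length := by omega
      have hget : PySem.List.pyGetD a (low + (high - low) / 2) 0
          = a[(low + (high - low) / 2).toNat] :=
        PySem.List.pyGetD_eq_getElem a 0 hm0 (by exact_mod_cast hml)
      have hbs : (a.map (fun x => decide (x ≤ value))).getD (low + (high - low) / 2).toNat false
          = decide (a[(low + (high - low) / 2).toNat] ≤ value) := by
        rw [List.getD_eq_getElem _ _ (by simpa using hmlt), List.getElem_map]
      rw [bv4AltLoop, dif_pos hlh, patLoopB, if_pos hlh, hget]
      simp only [hbs, decide_eq_true_eq]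
      by_cases hv : a[(low + (high - low) / 2).toNat] ≤ value
      · rw [if_pos (c := a[(low + (high - low) / 2).toNat] ≤ value) hv, if_pos (c := a[(low + (high - low) / 2).toNat] ≤ value) hv]
        exact ih _ _ _ (by omega) (by omega) hh
      · rw [if_neg (c := a[(low + (high - low) / 2).toNat] ≤ value) hv, if_neg (c := a[(low + (high - low) / 2).toNat] ≤ value) hv]
        exact ih _ _ _ (by omega) h0 (by omega)
    · rw [bv4AltLoop, dif_neg hlh, patLoopB, if_neg hlh]

-- finite check over all boolean patterns of length ≤ 5
theorem pat_small : ∀ (bs : List Bool), bs.length ≤ 5 →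
    patLoopA bs 6 0 ((bs.length : Int) - 1)
      = patLoopB bs 6 0 ((bs.length : Int) - 1) (-1) := by
  intro bs h
  rcases bs with _ | ⟨b0, _ | ⟨b1, _ | ⟨b2, _ | ⟨b3, _ | ⟨b4, _ | ⟨b5, rest⟩⟩⟩⟩⟩⟩
  · decide
  · revert b0; decide
  · revert b0 b1; decide
  · revert b0 b1 b2; decide
  · revert b0 b1 b2 b3; decide
  · revert b0 b1 b2 b3 b4; decide
  · simp at h; omega

-- In a value-partitioned list, an element is ≤ value iff its index is below the
-- count of elements ≤ value.
theorem part_le_iff_lt_countP (value : Int) :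
    ∀ (a : List Int), List.Pairwise (fun x y => y ≤ value → x ≤ value) a →
      ∀ (i : Nat) (hi : i < a.length),
        (a[i] ≤ value ↔ i < a.countP (fun x => decide (x ≤ value))) := by
  intro a
  induction a with
  | nil => intro _ i hi; simp at hi
  | cons x xs ih =>
    intro hp i hi
    rcases List.pairwise_cons.mp hp with ⟨hx, hxs⟩
    by_cases hxv : x ≤ value
    · cases i with
      | zero => simp [hxv]
      | succ j =>
        have hj : j < xs.length := by simpa using hi
        have hcnt : (x :: xs).countP (fun x => decide (x ≤ value))
            = xs.countP (fun x => decide (x ≤ value)) + 1 := by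
          simp [hxv]
        rw [hcnt]
        simp only [List.getElem_cons_succ]
        rw [ih hxs j hj]
        omega
    · have hz : xs.countP (fun x => decide (x ≤ value)) = 0 := by
        rw [List.countP_eq_zero]
        intro y hy hdy
        exact hxv (hx y hy (by simpa using hdy))
      have hc : (x :: xs).countP (fun x => decide (x ≤ value)) = 0 := by
        simp [hxv, hz]
      rw [hc]
      cases i with
      | zero => simp [hxv]
      | succ j =>
        have hj : j < xs.length := by simpa using hi
        have hmem : xs[j] ∈ xs := List.getElem_mem hj
        have himp := hx _ hmem
        simp only [List.getElem_cons_succ]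
        constructor
        · intro hle; exact absurd (himp hle) hxv
        · intro hlt; omega

-- B's loop computes (countP ≤value) - 1 under the standard binary-search invariant.
theorem altLoop_spec (a : List Int) (value : Int)
    (hchar : ∀ (i : Nat) (hi : i < a.length),
        (a[i] ≤ value ↔ i < a.countP (fun x => decide (x ≤ value)))) :
    ∀ (n : Nat) (low high ans : Int), (high + 1 - low).toNat ≤ n →
      0 ≤ low → high ≤ (a.length : Int) - 1 →
      low ≤ (a.countP (fun x => decide (x ≤ value)) : Int) →
      (a.countP (fun x => decide (x ≤ value)) : Int) ≤ high + 1 →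
      ans = low - 1 →
      bv4AltLoop a value low high ans = (a.countP (fun x => decide (x ≤ value)) : Int) - 1 := by
  intro n
  induction n with
  | zero =>
    intro low high ans hn h0 _ hlc hch hans
    have hlh : ¬ low ≤ high := by omega
    rw [bv4AltLoop, dif_neg hlh]
    omega
  | succ m ih =>
    intro low high ans hn h0 hh hlc hch hans
    by_cases hlh : low ≤ high
    · rw [bv4AltLoop, dif_pos hlh]
      have hm0 : 0 ≤ low + (high - low) / 2 := by omega
      have hml : low + (high - low) / 2 < (a.length : Int) := by omega
      have hmlt : (low + (high - low) / 2).toNat < a.length := by omega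
      have hget : PySem.List.pyGetD a (low + (high - low) / 2) 0
          = a[(low + (high - low) / 2).toNat] :=
        PySem.List.pyGetD_eq_getElem a 0 hm0 (by exact_mod_cast hml)
      have hcharm := hchar (low + (high - low) / 2).toNat hmlt
      by_cases hle : PySem.List.pyGetD a (low + (high - low) / 2) 0 ≤ value
      · rw [if_pos hle]
        have hlt : (low + (high - low) / 2).toNat < a.countP (fun x => decide (x ≤ value)) := by
          rw [← hcharm, ← hget]; exact hle
        exact ih _ _ _ (by omega) (by omega) hh (by omega) hch (by omega)
      · rw [if_neg hle]
        have hge : ¬ (low + (high - low) / 2).toNat < a.countP (fun x => decide (x ≤ value)) := by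
          rw [← hcharm, ← hget]; exact hle
        exact ih _ _ _ (by omega) h0 (by omega) hlc (by omega) hans
    · rw [bv4AltLoop, dif_neg hlh]
      omega

-- A's loop computes (countP ≤value) - 1 under its (slightly different) invariant.
theorem loopA_spec (a : List Int) (value : Int)
    (hchar : ∀ (i : Nat) (hi : i < a.length),
        (a[i] ≤ value ↔ i < a.countP (fun x => decide (x ≤ value)))) :
    ∀ (n : Nat) (low high : Int), (high + 1 - low).toNat ≤ n →
      0 ≤ low → high ≤ (a.length : Int) - 1 →
      (a.countP (fun x => decide (x ≤ value)) : Int) ≤ high + 1 →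
      (low < (a.countP (fun x => decide (x ≤ value)) : Int) ∨
        (low = 0 ∧ (a.countP (fun x => decide (x ≤ value)) : Int) = 0)) →
      bv4Loop a value low high = (a.countP (fun x => decide (x ≤ value)) : Int) - 1 := by
  intro n
  induction n with
  | zero =>
    intro low high hn h0 _ hch hd
    have hlh : ¬ low ≤ high := by omega
    rw [bv4Loop, dif_neg hlh]
    omega
  | succ m ih =>
    intro low high hn h0 hh hch hd
    by_cases hlh : low ≤ high
    · rw [bv4Loop, dif_pos hlh]
      have hm0 : 0 ≤ low + (high - low) / 2 := by omega
      have hml : low + (high - low) / 2 < (a.length : Int) := by omega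
      have hmlt : (low + (high - low) / 2).toNat < a.length := by omega
      have hget : PySem.List.pyGetD a (low + (high - low) / 2) 0
          = a[(low + (high - low) / 2).toNat] :=
        PySem.List.pyGetD_eq_getElem a 0 hm0 (by exact_mod_cast hml)
      have hcharm := hchar (low + (high - low) / 2).toNat hmlt
      by_cases hgt : PySem.List.pyGetD a (low + (high - low) / 2) 0 > value
      · rw [if_pos hgt]
        have hge : ¬ (low + (high - low) / 2).toNat < a.countP (fun x => decide (x ≤ value)) := by
          rw [← hcharm, ← hget]; omega
        exact ih _ _ (by omega) h0 (by omega) (by omega) hd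
      · rw [if_neg hgt]
        have hlt : (low + (high - low) / 2).toNat < a.countP (fun x => decide (x ≤ value)) := by
          rw [← hcharm, ← hget]; omega
        by_cases hret : (low + (high - low) / 2) = (a.length : Int) - 1 ∨
            PySem.List.pyGetD a ((low + (high - low) / 2) + 1) 0 > value
        · rw [if_pos hret]
          rcases hret with hlast | hnext
          · omega
          · have hn0 : 0 ≤ (low + (high - low) / 2) + 1 := by omega
            by_cases hnl : (low + (high - low) / 2) + 1 < (a.length : Int)
            · have hnlt : ((low + (high - low) / 2) + 1).toNat < a.length := by omega
              have hgn : PySem.List.pyGetD a ((low + (high - low) / 2) + 1) 0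
                  = a[((low + (high - low) / 2) + 1).toNat] :=
                PySem.List.pyGetD_eq_getElem a 0 hn0 (by exact_mod_cast hnl)
              have hcharn := hchar ((low + (high - low) / 2) + 1).toNat hnlt
              have : ¬ ((low + (high - low) / 2) + 1).toNat
                  < a.countP (fun x => decide (x ≤ value)) := by
                rw [← hcharn, ← hgn]; omega
              omega
            · omega
        · rw [if_neg hret]
          have hlast : (low + (high - low) / 2) ≠ (a.length : Int) - 1 :=
            fun h => hret (Or.inl h)
          have hnle : ¬ PySem.List.pyGetD a ((low + (high - low) / 2) + 1) 0 > value :=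
            fun h => hret (Or.inr h)
          have hnl : (low + (high - low) / 2) + 1 < (a.length : Int) := by omega
          have hnlt : ((low + (high - low) / 2) + 1).toNat < a.length := by omega
          have hgn : PySem.List.pyGetD a ((low + (high - low) / 2) + 1) 0
              = a[((low + (high - low) / 2) + 1).toNat] :=
            PySem.List.pyGetD_eq_getElem a 0 (by omega) (by exact_mod_cast hnl)
          have hltn : ((low + (high - low) / 2) + 1).toNat
              < a.countP (fun x => decide (x ≤ value)) := by
            rw [← hchar _ hnlt, ← hgn]; omega
          exact ih _ _ (by omega) (by omega) hh hch (by omega)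
    · rw [bv4Loop, dif_neg hlh]
      omega

-- ===== VERDICT (by name: the statement is the Claim_ definition above) =====
theorem bsearch_variation4_spec : Claim_equal_bsearch_variation4 := by
  intro a value _dom hpre
  unfold Spec_bsearch_variation4 bsearch_variation4 bsearch_variation4_alt
  rcases hpre with hlen | hpart
  · rw [factorA a value 6 0 ((a.length : Int) - 1) (by omega) (by omega) (by omega),
      factorB a value 6 0 ((a.length : Int) - 1) (-1) (by omega) (by omega) (by omega)]
    have := pat_small (a.map (fun x => decide (x ≤ value))) (by simpa using hlen)
    simpa using this
  · have hchar := part_le_iff_lt_countP value a hpart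
    have hcle : a.countP (fun x => decide (x ≤ value)) ≤ a.length := List.countP_le_length
    rw [loopA_spec a value hchar ((a.length : Int) - 1 + 1 - 0).toNat 0 ((a.length : Int) - 1)
        (by omega) (by omega) (by omega) (by omega) (by omega),
      altLoop_spec a value hchar ((a.length : Int) - 1 + 1 - 0).toNat 0 ((a.length : Int) - 1) (-1)
        (by omega) (by omega) (by omega) (by omega) (by omega) (by omega)]
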